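-- pv_equiv track=rewrite | github.com/edybass/environmental-impact-assessment | src/services/report_service.py | _get_jurisdiction
-- ===== SOURCE A (Python) =====
-- def _get_jurisdiction(location: str) -> str:
--     """Get jurisdiction from location."""
--     location_lower = location.lower()
--     if any(loc in location_lower for loc in ['dubai', 'abu dhabi', 'sharjah', 'uae']):
--         if 'dubai' in location_lower:
--             return 'Dubai'
--         elif 'abu dhabi' in location_lower:
--             return 'Abu Dhabi'
--         else:
--             return 'UAE Federal'
--     elif any(loc in location_lower for loc in ['riyadh', 'jeddah', 'neom', 'ksa', 'saudi']):
--         if 'neom' in location_lower: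
--             return 'NEOM'
--         else:
--             return 'KSA National'
--     else:
--         return 'UAE Federal'  # Default
-- ===== SOURCE B (Python) =====
-- _KEYWORDS = ['dubai', 'abu dhabi', 'sharjah', 'uae', 'neom', 'riyadh', 'jeddah', 'ksa', 'saudi']
-- _LABELS = ['Dubai', 'Abu Dhabi', 'UAE Federal', 'UAE Federal', 'NEOM',
--            'KSA National', 'KSA National', 'KSA National', 'KSA National']
--
--
-- def _get_jurisdiction(location: str) -> str:
--     """Get jurisdiction from location.
--
--     Single left-to-right scan of the text: at each position, a naive
--     multi-pattern matcher tests which keywords start there and keeps the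
--     best (lowest) priority seen; the priority order of _KEYWORDS encodes
--     the original precedence, 'UAE Federal' is the default.
--     """
--     low = location.lower()
--     best = len(_KEYWORDS)  # sentinel: nothing matched yet
--     for i in range(len(low)):
--         for k, kw in enumerate(_KEYWORDS):
--             if k < best and low.startswith(kw, i):
--                 best = k
--     return _LABELS[best] if best < len(_KEYWORDS) else 'UAE Federal'
-- ===== Notes on version B (the rewrite author's own statement) =====
-- stated objective: alternative
-- what changed: Instead of A's branching over nine independent whole-string substring searches, B makes a single left-to-right scan of the lowered text, at each position testing which keywords start there (naive multi-pattern matching) and keeping the lowest-priority-index match; the keyword order encodes A's precedence and the priority index selects the label at the end.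
import Mathlib
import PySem

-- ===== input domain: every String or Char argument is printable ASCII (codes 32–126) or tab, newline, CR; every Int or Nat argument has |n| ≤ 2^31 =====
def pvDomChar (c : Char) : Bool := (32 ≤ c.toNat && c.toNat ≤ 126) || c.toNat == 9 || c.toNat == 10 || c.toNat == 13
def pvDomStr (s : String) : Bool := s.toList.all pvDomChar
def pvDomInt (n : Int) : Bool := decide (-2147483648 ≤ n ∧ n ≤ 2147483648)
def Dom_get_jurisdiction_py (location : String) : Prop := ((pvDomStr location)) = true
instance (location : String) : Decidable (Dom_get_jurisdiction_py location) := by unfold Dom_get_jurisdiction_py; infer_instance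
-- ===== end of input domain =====

-- B replaces A's branching over independent whole-string substring searches by a single
-- left-to-right scan of the text: a naive multi-pattern matcher that, at each position,
-- records the best (lowest) priority keyword starting there; objective: alternative.

-- ===== PORT A =====
def get_jurisdiction_py (location : String) : String :=
  let location_lower := PySem.Str.lower location
  if ["dubai", "abu dhabi", "sharjah", "uae"].any (fun loc => PySem.Str.isIn loc location_lower) then
    if PySem.Str.isIn "dubai" location_lower then "Dubai"
    else if PySem.Str.isIn "abu dhabi" location_lower then "Abu Dhabi"
    else "UAE Federal"
  else if ["riyadh", "jeddah", "neom", "ksa", "saudi"].any (fun loc => PySem.Str.isIn loc location_lower) then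
    if PySem.Str.isIn "neom" location_lower then "NEOM"
    else "KSA National"
  else "UAE Federal"

-- ===== PORT B =====
-- _KEYWORDS (strings kept as List Char, the PySem representation)
def pvKeywords : List (List Char) :=
  ["dubai".toList, "abu dhabi".toList, "sharjah".toList, "uae".toList, "neom".toList,
   "riyadh".toList, "jeddah".toList, "ksa".toList, "saudi".toList]

-- _LABELS
def pvLabels : List String :=
  ["Dubai", "Abu Dhabi", "UAE Federal", "UAE Federal", "NEOM",
   "KSA National", "KSA National", "KSA National", "KSA National"]

-- inner loop: `for k, kw in enumerate(_KEYWORDS): if k < best and low.startswith(kw, i): best = k`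
-- (Python's low.startswith(kw, i) with 0 ≤ i ≤ len(low) is exactly kw.isPrefixOf (low.drop i))
def pvInner (low : List Char) (i : Nat) (best : Int) : Int :=
  (PySem.List.enumerate pvKeywords 0).foldl
    (fun b p => if p.1 < b ∧ p.2.isPrefixOf (low.drop i) then p.1 else b) best

def get_jurisdiction_py_alt (location : String) : String :=
  let low := (PySem.Str.lower location).toList
  let best : Int := (List.range low.length).foldl (fun b i => pvInner low i b) 9
  if best < 9 then PySem.List.pyGetD pvLabels best "" else "UAE Federal"

-- ===== PRECONDITION & SPEC =====
def Spec_get_jurisdiction_py (location : String) (out : String) : Prop := out = get_jurisdiction_py_alt location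
instance (location : String) (out : String) : Decidable (Spec_get_jurisdiction_py location out) := by unfold Spec_get_jurisdiction_py; infer_instance

-- ===== CLAIM (what is proved, stated in full; the proofs are below) =====
def Claim_equal_get_jurisdiction_py : Prop := ∀ (location : String), Dom_get_jurisdiction_py location → Spec_get_jurisdiction_py location (get_jurisdiction_py location)

-- ===== LEMMAS AND PROOFS =====

-- keyword k of the table (proof-side accessor)
def pvKw (k : Nat) : List Char := pvKeywords.getD k []

-- first index (in the given priority order) whose predicate holds, default 9
def pvFirstK (p : Nat → Bool) : List Nat → Int
  | [] => 9
  | k :: t => if p k then (k : Int) else pvFirstK p t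

def pvIdx : List Nat := [0, 1, 2, 3, 4, 5, 6, 7, 8]

lemma pvFirstK_ge (p : Nat → Bool) (t : List Nat) (c : Int)
    (h : ∀ x ∈ t, c ≤ (x : Int)) (h9 : c ≤ 9) : c ≤ pvFirstK p t := by
  induction t with
  | nil => simpa [pvFirstK]
  | cons k t ih =>
      simp only [pvFirstK]
      split
      · exact h k (by simp)
      · exact ih (fun x hx => h x (by simp [hx]))

lemma pvFirstK_min (p q : Nat → Bool) (l : List Nat)
    (hs : l.Pairwise (· ≤ ·)) (h9 : ∀ x ∈ l, x ≤ 9) :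
    min (pvFirstK p l) (pvFirstK q l) = pvFirstK (fun k => p k || q k) l := by
  induction l with
  | nil => simp [pvFirstK]
  | cons k t ih =>
      have hk9 : (k : Int) ≤ 9 := by exact_mod_cast h9 k (by simp)
      have hge : ∀ (r : Nat → Bool), (k : Int) ≤ pvFirstK r t := fun r =>
        pvFirstK_ge r t k (fun x hx => by exact_mod_cast (List.pairwise_cons.mp hs).1 x hx) hk9
      cases hp : p k <;> cases hq : q k <;>
        simp only [pvFirstK, hp, hq, Bool.false_or, Bool.true_or, Bool.or_self,
          if_true, if_false, Bool.false_eq_true]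
      · exact ih (List.pairwise_cons.mp hs).2 (fun x hx => h9 x (by simp [hx]))
      · exact min_eq_right (hge p)
      · exact min_eq_left (hge q)
      · exact min_self _

-- the inner fold only decreases the accumulator
lemma pvFold_le (low : List Char) (i : Nat) (l : List (Int × List Char)) (b : Int) :
    l.foldl (fun b p => if p.1 < b ∧ p.2.isPrefixOf (low.drop i) then p.1 else b) b ≤ b := by
  induction l generalizing b with
  | nil => simp
  | cons p t ih =>
      simp only [List.foldl_cons]
      split
      · exact le_trans (ih _) (by omega)
      · exact ih b

-- the inner fold distributes over min
lemma pvFold_min (low : List Char) (i : Nat) (l : List (Int × List Char)) (b c : Int) :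
    l.foldl (fun b p => if p.1 < b ∧ p.2.isPrefixOf (low.drop i) then p.1 else b) (min b c)
      = min b (l.foldl (fun b p => if p.1 < b ∧ p.2.isPrefixOf (low.drop i) then p.1 else b) c) := by
  induction l generalizing b c with
  | nil => simp
  | cons p t ih =>
      simp only [List.foldl_cons]
      by_cases hm : p.2.isPrefixOf (low.drop i)
      · by_cases h1 : p.1 < c
        · by_cases h2 : p.1 < b
          · rw [if_pos ⟨by omega, hm⟩, if_pos ⟨h1, hm⟩]
            exact (min_eq_right (le_of_lt (lt_of_le_of_lt (pvFold_le low i t p.1) h2))).symm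
          · rw [if_neg (by omega : ¬ (p.1 < min b c ∧ p.2.isPrefixOf (low.drop i) )), if_pos ⟨h1, hm⟩]
            have hbc : min b c = min b p.1 := by omega
            rw [hbc, ih]
        · rw [if_neg (by omega : ¬ (p.1 < min b c ∧ p.2.isPrefixOf (low.drop i) )),
              if_neg (by omega : ¬ (p.1 < c ∧ p.2.isPrefixOf (low.drop i) )), ih]
      · simp only [hm, Bool.false_eq_true, and_false, if_false]
        exact ih b c

lemma pvInner_le (low : List Char) (i : Nat) (b : Int) : pvInner low i b ≤ b :=
  pvFold_le low i _ b

lemma pvInner_min (low : List Char) (i : Nat) (b c : Int) :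
    pvInner low i (min b c) = min b (pvInner low i c) :=
  pvFold_min low i _ b c

-- the outer fold distributes over min
lemma pvOuter_min (low : List Char) (P : List Nat) (b c : Int) :
    P.foldl (fun b i => pvInner low i b) (min b c)
      = min b (P.foldl (fun b i => pvInner low i b) c) := by
  induction P generalizing b c with
  | nil => simp
  | cons i P ih =>
      simp only [List.foldl_cons]
      rw [pvInner_min, ih]

lemma pvOuter_cons (low : List Char) (i : Nat) (P : List Nat) :
    (i :: P).foldl (fun b i => pvInner low i b) 9
      = min (pvInner low i 9) (P.foldl (fun b i => pvInner low i b) 9) := by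
  have h : pvInner low i 9 = min (pvInner low i 9) 9 :=
    (min_eq_left (pvInner_le low i 9)).symm
  simp only [List.foldl_cons]
  conv_lhs => rw [h]
  rw [pvOuter_min]

-- first matching entry of an (index, keyword) table, default 9
def pvFirstMatch (m : List Char → Bool) : List (Int × List Char) → Int
  | [] => 9
  | p :: t => if m p.2 then p.1 else pvFirstMatch m t

-- once every remaining index fails the guard, the fold is constant
lemma pvFold_stay (m : List Char → Bool) (l : List (Int × List Char)) (b : Int)
    (h : ∀ q ∈ l, ¬ q.1 < b) :
    l.foldl (fun b p => if p.1 < b ∧ m p.2 = true then p.1 else b) b = b := by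
  induction l with
  | nil => rfl
  | cons p t ih =>
      have hg : ¬ (p.1 < b ∧ m p.2 = true) := fun hc => h p (by simp) hc.1
      simp only [List.foldl_cons, if_neg hg]
      exact ih (fun q hq => h q (by simp [hq]))

-- over an index-ascending table starting above every index, the guarded fold is first-match
lemma pvFold_first (m : List Char → Bool) (l : List (Int × List Char))
    (hasc : l.Pairwise (fun p q => p.1 < q.1)) (hb : ∀ p ∈ l, p.1 < 9) :
    l.foldl (fun b p => if p.1 < b ∧ m p.2 = true then p.1 else b) 9 = pvFirstMatch m l := by
  induction l with
  | nil => rfl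
  | cons p t ih =>
      simp only [List.foldl_cons, pvFirstMatch]
      by_cases hm : m p.2
      · rw [if_pos ⟨hb p (by simp), by simp [hm]⟩, if_pos hm]
        exact pvFold_stay m t p.1
          (fun q hq => by have := (List.pairwise_cons.mp hasc).1 q hq; omega)
      · rw [if_neg (by simp [hm]), if_neg hm]
        exact ih (List.pairwise_cons.mp hasc).2 (fun q hq => hb q (by simp [hq]))

-- one position of the scan finds the first keyword starting there
lemma pvInner_eq_firstK (low : List Char) (i : Nat) :
    pvInner low i 9 = pvFirstK (fun k => (pvKw k).isPrefixOf (low.drop i)) pvIdx := by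
  have he : PySem.List.enumerate pvKeywords 0 =
      [((0:Int), "dubai".toList), (1, "abu dhabi".toList), (2, "sharjah".toList),
       (3, "uae".toList), (4, "neom".toList), (5, "riyadh".toList), (6, "jeddah".toList),
       (7, "ksa".toList), (8, "saudi".toList)] := by rfl
  unfold pvInner
  rw [he, pvFold_first (fun kw => kw.isPrefixOf (low.drop i)) _ (by decide) (by decide)]
  simp [pvFirstMatch, pvFirstK, pvIdx, pvKw, pvKeywords]

-- the whole scan finds the first keyword that starts anywhere
lemma pvMain (low : List Char) (P : List Nat) :
    P.foldl (fun b i => pvInner low i b) 9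
      = pvFirstK (fun k => P.any (fun i => (pvKw k).isPrefixOf (low.drop i))) pvIdx := by
  induction P with
  | nil => simp [pvFirstK, pvIdx]
  | cons i P ih =>
      rw [pvOuter_cons, pvInner_eq_firstK, ih,
        pvFirstK_min _ _ pvIdx (by decide) (by decide)]
      simp only [List.any_cons]
  -- predicates agree pointwise

-- scanning all start positions IS substring search (for a nonempty pattern)
lemma pvAny_eq_isIn (sub low : List Char) (h : sub ≠ []) :
    (List.range low.length).any (fun i => sub.isPrefixOf (low.drop i))
      = PySem.Chars.isIn sub low := by
  cases hI : PySem.Chars.isIn sub low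
  · rw [List.any_eq_false]
    intro i _ hpre
    have : PySem.Chars.isIn sub low = true :=
      (PySem.Chars.exists_prefix_drop_iff_isIn sub low).mp
        ⟨i, List.isPrefixOf_iff_prefix.mp hpre⟩
    simp [hI] at this
  · rw [List.any_eq_true]
    obtain ⟨j, hj⟩ := (PySem.Chars.exists_prefix_drop_iff_isIn sub low).mpr hI
    by_cases hjl : j < low.length
    · exact ⟨j, List.mem_range.mpr hjl, List.isPrefixOf_iff_prefix.mpr hj⟩
    · exfalso
      rw [List.drop_eq_nil_of_le (by omega)] at hj
      exact h (List.prefix_nil.mp hj)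

-- the decision table over the nine membership booleans: A's gated chain vs B's first-match lookup
lemma pvFinalTable (b0 b1 b2 b3 b4 b5 b6 b7 b8 : Bool) :
    (if (b0 || (b1 || (b2 || b3))) = true then
        (if b0 = true then "Dubai" else if b1 = true then "Abu Dhabi" else "UAE Federal")
      else if (b5 || (b6 || (b4 || (b7 || b8)))) = true then
        (if b4 = true then "NEOM" else "KSA National")
      else "UAE Federal")
    = (if (if b0 = true then (0:Int) else if b1 = true then 1 else if b2 = true then 2
           else if b3 = true then 3 else if b4 = true then 4 else if b5 = true then 5
           else if b6 = true then 6 else if b7 = true then 7 else if b8 = true then 8 else 9) < 9 then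
         PySem.List.pyGetD pvLabels
           (if b0 = true then (0:Int) else if b1 = true then 1 else if b2 = true then 2
            else if b3 = true then 3 else if b4 = true then 4 else if b5 = true then 5
            else if b6 = true then 6 else if b7 = true then 7 else if b8 = true then 8 else 9) ""
       else "UAE Federal") := by
  cases b0 <;> cases b1 <;> cases b2 <;> cases b3 <;> cases b4 <;>
    cases b5 <;> cases b6 <;> cases b7 <;> cases b8 <;> rfl

-- ===== VERDICT (by name: the statement is the Claim_ definition above) =====
theorem get_jurisdiction_py_spec : Claim_equal_get_jurisdiction_py := by
  intro location _
  unfold Spec_get_jurisdiction_py get_jurisdiction_py get_jurisdiction_py_alt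
  simp only [pvMain]
  have e0 := pvAny_eq_isIn "dubai".toList ((PySem.Str.lower location).toList) (by decide)
  have e1 := pvAny_eq_isIn "abu dhabi".toList ((PySem.Str.lower location).toList) (by decide)
  have e2 := pvAny_eq_isIn "sharjah".toList ((PySem.Str.lower location).toList) (by decide)
  have e3 := pvAny_eq_isIn "uae".toList ((PySem.Str.lower location).toList) (by decide)
  have e4 := pvAny_eq_isIn "neom".toList ((PySem.Str.lower location).toList) (by decide)
  have e5 := pvAny_eq_isIn "riyadh".toList ((PySem.Str.lower location).toList) (by decide)
  have e6 := pvAny_eq_isIn "jeddah".toList ((PySem.Str.lower location).toList) (by decide)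
  have e7 := pvAny_eq_isIn "ksa".toList ((PySem.Str.lower location).toList) (by decide)
  have e8 := pvAny_eq_isIn "saudi".toList ((PySem.Str.lower location).toList) (by decide)
  simp only [pvFirstK, pvIdx, pvKw, pvKeywords, List.getD_cons_zero, List.getD_cons_succ,
    List.any_cons, List.any_nil, Bool.or_false, PySem.Str.isIn_eq, e0, e1, e2, e3, e4, e5, e6, e7, e8]
  exact pvFinalTable _ _ _ _ _ _ _ _ _
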